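-- pv_equiv track=rewrite | github.com/costa-group/grey | src/liveness/utils.py | find_longest_none_sequence
-- ===== SOURCE A (Python) =====
-- from typing import Dict, List, Optional, Tuple
--
-- def find_longest_none_sequence(none_list: List[Optional[str]]) -> Tuple[int, int]:
--     """
--     Given a list with elements, possibly None, this methods finds a suffix
--     s.t. # None elements - # other elements is maximized.
--     TODO: decide tie which one is better
--     """
--     best_count, best_idx = 0, len(none_list)
--     current_count, j = 0, len(none_list) - 1
--     while j >= 0:
--         current_count += 1 if none_list[j] is None else -1
--         # For now, we just leave the
--         if current_count > best_count:
--             best_count = current_count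
--             best_idx = j
--         j -= 1
--     return best_idx, best_count
-- ===== SOURCE B (Python) =====
-- def find_longest_none_sequence(none_list):
--     # Forward scan: running prefix sum p (+1 for None, -1 otherwise); the best
--     # suffix balance is p_final - min prefix sum, taken at the LAST index
--     # achieving the minimum (<= update), matching the backward scan's tie-break.
--     p = 0
--     min_p = 0
--     min_idx = 0
--     for i, x in enumerate(none_list, 1):
--         p += 1 if x is None else -1
--         if p <= min_p:
--             min_p, min_idx = p, i
--     return min_idx, p - min_p
-- ===== Notes on version B (the rewrite author's own statement) =====
-- stated objective: alternative
-- what changed: Replaced the backward suffix-running-max scan by a forward prefix-sum scan using the identity max suffix balance = total - min prefix sum, keeping the largest minimizing index to preserve the tie-break.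
import Mathlib
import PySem

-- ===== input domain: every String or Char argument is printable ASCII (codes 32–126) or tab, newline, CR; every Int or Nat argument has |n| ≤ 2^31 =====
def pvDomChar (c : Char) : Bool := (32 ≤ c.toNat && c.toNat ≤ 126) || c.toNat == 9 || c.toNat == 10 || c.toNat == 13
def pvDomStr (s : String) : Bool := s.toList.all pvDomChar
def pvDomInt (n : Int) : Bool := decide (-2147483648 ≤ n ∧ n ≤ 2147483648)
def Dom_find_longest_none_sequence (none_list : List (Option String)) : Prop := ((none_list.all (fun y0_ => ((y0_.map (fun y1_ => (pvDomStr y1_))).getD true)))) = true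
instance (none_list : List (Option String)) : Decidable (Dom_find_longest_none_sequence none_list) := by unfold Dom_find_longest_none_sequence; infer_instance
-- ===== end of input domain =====

-- B replaces A's backward suffix-running-max scan by a forward prefix-minimum scan
-- (max suffix balance = total − min prefix sum, largest minimizing index); same O(n) cost.

-- ===== PORT A =====
-- A's while loop: j runs len-1 .. 0; state (best_count, best_idx, current_count).
def flnsA_loop (l : List (Option String)) : Nat → Int × Int × Int → Int × Int × Int
  | 0, st => st
  | k+1, (bc, bi, cc) =>
      let cc' := cc + (if l.getD k (some "") = none then 1 else -1)
      flnsA_loop l k (if cc' > bc then (cc', (k : Int), cc') else (bc, bi, cc'))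

def find_longest_none_sequence (none_list : List (Option String)) : Int × Int :=
  let n := none_list.length
  let r := flnsA_loop none_list n (0, (n : Int), 0)
  (r.2.1, r.1)

-- ===== PORT B =====
-- B's for loop: state (p, min_p, min_idx, i); i is the 1-based enumerate index.
def flnsB_step (st : Int × Int × Int × Int) (x : Option String) : Int × Int × Int × Int :=
  let p' := st.1 + (if x = none then 1 else -1)
  let i' := st.2.2.2 + 1
  if p' ≤ st.2.1 then (p', p', i', i') else (p', st.2.1, st.2.2.1, i')

def find_longest_none_sequence_alt (none_list : List (Option String)) : Int × Int :=
  let r := none_list.foldl flnsB_step (0, 0, 0, 0)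
  (r.2.2.1, r.1 - r.2.1)

-- ===== PRECONDITION & SPEC =====
def Spec_find_longest_none_sequence (none_list : List (Option String)) (out : Int × Int) : Prop := out = find_longest_none_sequence_alt none_list
instance (none_list : List (Option String)) (out : Int × Int) : Decidable (Spec_find_longest_none_sequence none_list out) := by unfold Spec_find_longest_none_sequence; infer_instance

-- ===== CLAIM (what is proved, stated in full; the proofs are below) =====
def Claim_equal_find_longest_none_sequence : Prop := ∀ (none_list : List (Option String)), Dom_find_longest_none_sequence none_list → Spec_find_longest_none_sequence none_list (find_longest_none_sequence none_list)

-- ===== LEMMAS AND PROOFS =====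

-- Reference: structural (suffix) form of A's backward scan.
def gAstep (x : Option String) (r : Int × Int × Int) : Int × Int × Int :=
  let cc' := r.2.2 + (if x = none then 1 else -1)
  if cc' > r.1 then (cc', 0, cc') else (r.1, r.2.1 + 1, cc')

def gA : List (Option String) → Int × Int × Int
  | [] => (0, 0, 0)
  | x :: t => gAstep x (gA t)

-- One unfolding step of A's loop, stated without lets (definitionally equal).
theorem flnsA_loop_succ (l : List (Option String)) (k : Nat) (bc bi cc : Int) :
    flnsA_loop l (k+1) (bc, bi, cc) =
      flnsA_loop l k
        (if cc + (if l.getD k (some "") = none then (1:Int) else -1) > bc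
         then (cc + (if l.getD k (some "") = none then (1:Int) else -1), (k : Int),
               cc + (if l.getD k (some "") = none then (1:Int) else -1))
         else (bc, bi, cc + (if l.getD k (some "") = none then (1:Int) else -1))) := rfl

-- A's index loop on (x :: t) factors through the loop on t with best_idx shifted by 1.
theorem flnsA_shift (t : List (Option String)) (x : Option String) :
    ∀ (k : Nat) (bc bi cc : Int),
      flnsA_loop (x :: t) (k+1) (bc, bi + 1, cc) =
        gAstep x (flnsA_loop t k (bc, bi, cc)) := by
  intro k
  induction k with
  | zero =>
      intro bc bi cc
      rw [flnsA_loop_succ]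
      simp only [List.getD_cons_zero, flnsA_loop, gAstep, Nat.cast_zero]
  | succ k ih =>
      intro bc bi cc
      conv_lhs => rw [flnsA_loop_succ]
      conv_rhs => rw [flnsA_loop_succ]
      rw [List.getD_cons_succ]
      by_cases hc : cc + (if t.getD k (some "") = none then (1:Int) else -1) > bc
      · rw [if_pos hc, if_pos hc]
        have hcast : ((k+1 : Nat) : Int) = ((k : Nat) : Int) + 1 := by push_cast; ring
        rw [hcast, ih]
      · rw [if_neg hc, if_neg hc, ih]

theorem flnsA_eq_gA : ∀ (l : List (Option String)),
    flnsA_loop l l.length (0, (l.length : Int), 0) = gA l := by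
  intro l
  induction l with
  | nil => rfl
  | cons x t ih =>
      show flnsA_loop (x :: t) (t.length + 1) (0, ((t.length + 1 : Nat) : Int), 0) = gA (x :: t)
      have hcast : ((t.length + 1 : Nat) : Int) = ((t.length : Nat) : Int) + 1 := by
        push_cast; ring
      rw [hcast, flnsA_shift t x t.length 0 ((t.length : Nat) : Int) 0, ih]
      rfl

-- Invariants of gA: best_count ≥ 0, best_count ≥ current balance, best_idx ≥ 0,
-- and best_idx = 0 forces best_count = current balance.
theorem gA_inv : ∀ (l : List (Option String)) (B I S : Int), gA l = (B, I, S) →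
    0 ≤ B ∧ S ≤ B ∧ 0 ≤ I ∧ (I = 0 → B = S) := by
  intro l
  induction l with
  | nil =>
      intro B I S h
      simp only [gA, Prod.mk.injEq] at h
      omega
  | cons x t ih =>
      intro B I S h
      rcases hg : gA t with ⟨B', I', S'⟩
      obtain ⟨h1, h2, h3, h4⟩ := ih B' I' S' hg
      simp only [gA, gAstep, hg] at h
      split_ifs at h with hc <;> simp only [Prod.mk.injEq] at h <;> omega

-- B's forward fold, characterized by gA of the remaining list.
theorem flnsB_fold : ∀ (t : List (Option String)) (B I S : Int), gA t = (B, I, S) →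
    ∀ (p m mi i : Int), m ≤ p →
      List.foldl flnsB_step (p, m, mi, i) t =
        (p + S,
         if p + S - B ≤ m ∧ I ≠ 0 then p + S - B else m,
         if p + S - B ≤ m ∧ I ≠ 0 then i + I else mi,
         i + (t.length : Int)) := by
  intro t
  induction t with
  | nil =>
      intro B I S h p m mi i hmp
      simp only [gA, Prod.mk.injEq] at h
      obtain ⟨hB, hI, hS⟩ := h
      subst hB; subst hI; subst hS
      simp
  | cons x t ih =>
      intro B2 I2 S2 hgc p m mi i hmp
      rcases hg : gA t with ⟨B, I, S⟩
      obtain ⟨hB, hS, hI, hI0⟩ := gA_inv t B I S hg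
      simp only [gA, gAstep, hg] at hgc
      simp only [List.foldl_cons, flnsB_step]
      have hdd : (if x = none then (1:Int) else -1) = 1 ∨ (if x = none then (1:Int) else -1) = -1 := by
        by_cases hx : x = none <;> simp [hx]
      generalize hd : (if x = none then (1:Int) else -1) = d at hgc hdd ⊢
      rcases hdd with hd1 | hd1 <;>
      · have hlen : (((x :: t).length : Nat) : Int) = ((t.length : Nat) : Int) + 1 := by
          push_cast [List.length_cons]; ring
        rw [hlen]
        split_ifs at hgc with hcase <;>
          simp only [Prod.mk.injEq] at hgc <;>
          obtain ⟨e1, e2, e3⟩ := hgc <;>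
          subst e1 <;> subst e2 <;> subst e3 <;>
          by_cases h1 : p + d ≤ m
        · rw [if_pos h1, ih B I S hg (p + d) (p + d) (i + 1) (i + 1) le_rfl]
          simp only [Prod.mk.injEq]
          refine ⟨by omega, ?_, ?_, by omega⟩ <;> split_ifs <;> omega
        · rw [if_neg h1, ih B I S hg (p + d) m mi (i + 1) (by omega)]
          simp only [Prod.mk.injEq]
          refine ⟨by omega, ?_, ?_, by omega⟩ <;> split_ifs <;> omega
        · rw [if_pos h1, ih B I S hg (p + d) (p + d) (i + 1) (i + 1) le_rfl]
          simp only [Prod.mk.injEq]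
          refine ⟨by omega, ?_, ?_, by omega⟩ <;> split_ifs <;> omega
        · rw [if_neg h1, ih B I S hg (p + d) m mi (i + 1) (by omega)]
          simp only [Prod.mk.injEq]
          refine ⟨by omega, ?_, ?_, by omega⟩ <;> split_ifs <;> omega

-- ===== VERDICT (by name: the statement is the Claim_ definition above) =====
theorem find_longest_none_sequence_spec : Claim_equal_find_longest_none_sequence := by
  intro l _
  unfold Spec_find_longest_none_sequence find_longest_none_sequence find_longest_none_sequence_alt
  simp only []
  rcases hg : gA l with ⟨B, I, S⟩
  obtain ⟨hB, hS, hI, hI0⟩ := gA_inv l B I S hg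
  rw [flnsA_eq_gA l, hg, flnsB_fold l B I S hg 0 0 0 0 le_rfl]
  by_cases h : I = 0
  · simp [h, hI0 h]
  · simp only [Prod.mk.injEq]
    rw [if_pos ⟨by omega, h⟩, if_pos ⟨by omega, h⟩]
    constructor <;> [skip; omega]
    simp
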